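-- pv_equiv track=rewrite | github.com/lutacluny/Sheet-Music-Recognition | separate_groups_of_notes.py | calc_distribution_of_amount_of_related_black_pixel
-- ===== SOURCE A (Python) =====
-- def is_note_col(col):
--     if col == True:
--         return True
--     else:
--         return False
--
-- def calc_distribution_of_amount_of_related_black_pixel(marked_cols):
--     is_prev_note_col = False
--     actual_amount = 0
--
--     distribution = []
--
--     index_start = 0
--
--     index = 0
--     for col in marked_cols:
--
--         if is_note_col(col) and is_prev_note_col == False:
--             index_start = index
--             is_prev_note_col = True
--             actual_amount += 1
--
--         if not is_note_col(col) and is_prev_note_col == True: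
--             distribution.append((actual_amount, index_start))
--             actual_amount = 0
--             is_prev_note_col = False
--
--         if is_note_col(col) and is_prev_note_col == True:
--             actual_amount += 1
--
--         index += 1
--
--     return distribution
-- ===== SOURCE B (Python) =====
-- def is_note_col(col):
--     if col == True:
--         return True
--     else:
--         return False
--
-- def calc_distribution_of_amount_of_related_black_pixel(marked_cols):
--     # Scan the columns group by group: skip blank columns, scan one group of
--     # note columns, and when a blank column closes the group, record the width
--     # of the closed group (first note column through the closing blank column,
--     # inclusive) together with the group's start index.  A group that is still
--     # open at the right edge is never closed, so nothing is recorded for it.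
--     distribution = []
--     n = len(marked_cols)
--     i = 0
--     while True:
--         while i < n and not is_note_col(marked_cols[i]):
--             i += 1
--         start = i
--         while i < n and is_note_col(marked_cols[i]):
--             i += 1
--         if i == n:
--             return distribution
--         distribution.append((i - start + 1, start))
-- ===== Notes on version B (the rewrite author's own statement) =====
-- stated objective: alternative
-- what changed: Replaced A's single stateful flag-machine fold (prev-column flag, running counter, conditional resets) with a direct group scanner: two inner while-loops skip blank columns and scan one note group per outer iteration, recording the inclusive span from the group's start through the blank column that closes it; groups never closed before the right edge are simply not recorded.
import Mathlib
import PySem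

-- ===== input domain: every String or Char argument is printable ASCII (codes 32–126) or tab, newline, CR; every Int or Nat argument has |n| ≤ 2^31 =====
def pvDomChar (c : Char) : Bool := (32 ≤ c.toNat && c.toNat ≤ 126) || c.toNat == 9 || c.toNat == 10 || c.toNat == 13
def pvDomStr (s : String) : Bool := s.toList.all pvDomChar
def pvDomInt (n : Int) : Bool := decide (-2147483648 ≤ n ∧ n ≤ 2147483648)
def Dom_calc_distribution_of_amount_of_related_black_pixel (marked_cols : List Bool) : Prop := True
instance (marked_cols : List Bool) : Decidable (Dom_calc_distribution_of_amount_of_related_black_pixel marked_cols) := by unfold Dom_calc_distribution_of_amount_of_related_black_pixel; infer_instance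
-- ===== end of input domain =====

-- B replaces A's stateful flag-machine fold by a direct group scanner (skip blanks,
-- scan one note group, record its inclusive span through the closing blank column);
-- objective: alternative decomposition, same O(n) cost.

-- ===== PORT A =====
def is_note_col (col : Bool) : Bool := if col == true then true else false

-- state: (is_prev_note_col, actual_amount, distribution, index_start, index)
def pvStepA (st : Bool × Int × List (Int × Int) × Int × Int) (col : Bool) :
    Bool × Int × List (Int × Int) × Int × Int :=
  let (is_prev, amount, dist, istart, index) := st
  let (istart, is_prev, amount) :=
    if is_note_col col && !is_prev then (index, true, amount + 1)
    else (istart, is_prev, amount)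
  let (dist, amount, is_prev) :=
    if !(is_note_col col) && is_prev then (dist ++ [(amount, istart)], (0 : Int), false)
    else (dist, amount, is_prev)
  let amount := if is_note_col col && is_prev then amount + 1 else amount
  (is_prev, amount, dist, istart, index + 1)

def calc_distribution_of_amount_of_related_black_pixel (marked_cols : List Bool) : List (Int × Int) :=
  (marked_cols.foldl pvStepA (false, 0, [], 0, 0)).2.2.1

-- ===== PORT B =====
-- termination of B's scanner: the suffix left after one skip-blanks/scan-group step
-- is strictly shorter (the scanned group is nonempty whenever a suffix remains)
theorem pvGo_dec (cols : List Bool)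
    (h : ¬ ((cols.dropWhile (fun c => !is_note_col c)).dropWhile (fun c => is_note_col c)).isEmpty) :
    ((cols.dropWhile (fun c => !is_note_col c)).dropWhile (fun c => is_note_col c)).length < cols.length := by
  cases hl : cols.dropWhile (fun c => !is_note_col c) with
  | nil => rw [hl] at h; simp at h
  | cons hd tl =>
    have hnote : is_note_col hd = true := by
      have := List.head?_dropWhile_not (fun c => !is_note_col c) cols
      rw [hl] at this; simpa using this
    rw [List.dropWhile_cons_of_pos hnote]
    have h1 := List.length_dropWhile_le is_note_col tl
    have h2 : tl.length + 1 ≤ cols.length := by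
      have := List.length_dropWhile_le (fun c => !is_note_col c) cols
      rw [hl] at this; simpa using this
    omega

-- B's outer while-True loop: skip blank columns, scan one note group; if the scan
-- hit the end of the list, stop; otherwise record the group's inclusive span
-- (through the closing blank column) and its start, and continue after the group
def pvGo (cols : List Bool) (i : Int) : List (Int × Int) :=
  if _h : ((cols.dropWhile (fun c => !is_note_col c)).dropWhile (fun c => is_note_col c)).isEmpty then
    []
  else
    let start := i + ((cols.takeWhile (fun c => !is_note_col c)).length : Int)
    let run := (cols.dropWhile (fun c => !is_note_col c)).takeWhile (fun c => is_note_col c)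
    ((run.length : Int) + 1, start) ::
      pvGo ((cols.dropWhile (fun c => !is_note_col c)).dropWhile (fun c => is_note_col c))
        (start + (run.length : Int))
  termination_by cols.length
  decreasing_by exact pvGo_dec cols _h

def calc_distribution_of_amount_of_related_black_pixel_alt (marked_cols : List Bool) : List (Int × Int) :=
  pvGo marked_cols 0

-- ===== PRECONDITION & SPEC =====
def Spec_calc_distribution_of_amount_of_related_black_pixel (marked_cols : List Bool) (out : List (Int × Int)) : Prop := out = calc_distribution_of_amount_of_related_black_pixel_alt marked_cols
instance (marked_cols : List Bool) (out : List (Int × Int)) : Decidable (Spec_calc_distribution_of_amount_of_related_black_pixel marked_cols out) := by unfold Spec_calc_distribution_of_amount_of_related_black_pixel; infer_instance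

-- ===== CLAIM (what is proved, stated in full; the proofs are below) =====
def Claim_equal_calc_distribution_of_amount_of_related_black_pixel : Prop := ∀ (marked_cols : List Bool), Dom_calc_distribution_of_amount_of_related_black_pixel marked_cols → Spec_calc_distribution_of_amount_of_related_black_pixel marked_cols (calc_distribution_of_amount_of_related_black_pixel marked_cols)

-- ===== LEMMAS AND PROOFS =====

theorem is_note_col_eq (c : Bool) : is_note_col c = c := by cases c <;> rfl

-- the scanner state while inside a note group: m columns counted so far, group start s
def pvGoT (m s : Int) (l : List Bool) (i : Int) : List (Int × Int) :=
  let run := l.takeWhile (fun c => is_note_col c)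
  let rest := l.dropWhile (fun c => is_note_col c)
  if rest.isEmpty then []
  else (m + (run.length : Int), s) :: pvGo rest (i + (run.length : Int))

theorem pvGo_nil (i : Int) : pvGo [] i = [] := by rw [pvGo]; rfl

theorem pvGo_false (l : List Bool) (i : Int) : pvGo (false :: l) i = pvGo l (i + 1) := by
  conv_lhs => rw [pvGo]
  conv_rhs => rw [pvGo]
  simp only [is_note_col_eq, List.dropWhile_cons, List.takeWhile_cons, Bool.not_false,
    if_true, List.length_cons]
  split_ifs with h
  · rfl
  · congr 2 <;> push_cast <;> ring

theorem pvGo_true (l : List Bool) (i : Int) : pvGo (true :: l) i = pvGoT 2 i l (i + 1) := by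
  conv_lhs => rw [pvGo]
  unfold pvGoT
  simp only [is_note_col_eq, List.dropWhile_cons, List.takeWhile_cons, Bool.not_true,
    Bool.false_eq_true, if_true, ite_false, List.length_cons, List.length_nil]
  split_ifs with h
  · rfl
  · congr 2 <;> push_cast <;> ring

theorem pvGoT_nil (m s i : Int) : pvGoT m s [] i = [] := by rfl

theorem pvGoT_true (m s : Int) (l : List Bool) (i : Int) :
    pvGoT m s (true :: l) i = pvGoT (m + 1) s l (i + 1) := by
  unfold pvGoT
  simp only [is_note_col_eq, List.dropWhile_cons, List.takeWhile_cons, if_true,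
    List.length_cons]
  split_ifs with h
  · rfl
  · congr 2 <;> push_cast <;> ring

theorem pvGoT_false (m s : Int) (l : List Bool) (i : Int) :
    pvGoT m s (false :: l) i = (m, s) :: pvGo l (i + 1) := by
  unfold pvGoT
  simp only [is_note_col_eq, List.dropWhile_cons, List.takeWhile_cons,
    Bool.false_eq_true, ite_false, List.length_nil]
  rw [← pvGo_false]
  simp

theorem pvMain (l : List Bool) : ∀ (i : Int) (dist : List (Int × Int)) (s0 : Int),
    ((l.foldl pvStepA (false, 0, dist, s0, i)).2.2.1 = dist ++ pvGo l i) ∧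
    (∀ m : Int, (l.foldl pvStepA (true, m, dist, s0, i)).2.2.1 = dist ++ pvGoT m s0 l i) := by
  induction l with
  | nil => intro i dist s0; simp [List.foldl, pvGo_nil, pvGoT_nil]
  | cons c rest ih =>
    intro i dist s0
    cases c with
    | true =>
      constructor
      · have hs : pvStepA (false, 0, dist, s0, i) true = (true, 2, dist, i, i + 1) := by
          simp [pvStepA, is_note_col]
        rw [List.foldl_cons, hs, (ih (i + 1) dist i).2 2, pvGo_true]
      · intro m
        have hs : pvStepA (true, m, dist, s0, i) true = (true, m + 1, dist, s0, i + 1) := by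
          simp [pvStepA, is_note_col]
        rw [List.foldl_cons, hs, (ih (i + 1) dist s0).2 (m + 1), pvGoT_true]
    | false =>
      constructor
      · have hs : pvStepA (false, 0, dist, s0, i) false = (false, 0, dist, s0, i + 1) := by
          simp [pvStepA, is_note_col]
        rw [List.foldl_cons, hs, (ih (i + 1) dist s0).1, pvGo_false]
      · intro m
        have hs : pvStepA (true, m, dist, s0, i) false
            = (false, 0, dist ++ [(m, s0)], s0, i + 1) := by
          simp [pvStepA, is_note_col]
        rw [List.foldl_cons, hs, (ih (i + 1) (dist ++ [(m, s0)]) s0).1, pvGoT_false]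
        simp

-- ===== VERDICT (by name: the statement is the Claim_ definition above) =====
theorem calc_distribution_of_amount_of_related_black_pixel_spec : Claim_equal_calc_distribution_of_amount_of_related_black_pixel := by
  intro l _
  unfold Spec_calc_distribution_of_amount_of_related_black_pixel
  unfold calc_distribution_of_amount_of_related_black_pixel
  unfold calc_distribution_of_amount_of_related_black_pixel_alt
  rw [(pvMain l 0 [] 0).1, List.nil_append]
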